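-- pv_equiv track=rewrite | github.com/GGergy/MAI_ProgrammerDay_Bot | utils/templateutil.py | __get_portions
-- ===== SOURCE A (Python) =====
-- def __get_portions(length:int, value:int, reversed:bool=False) -> list:
--     '''
--     Examples:
--     (4, 16) -> [4, 4, 4, 4]
--     (5, 16) -> [4, 3, 3, 3, 3]
--     (5, 16, True) -> [3, 3, 3, 3, 4]
--     '''
--     # Special cases
--     if length == 0:
--         return []
--     # Algorithm
--     result = [0 for _ in range(length)]
--     addition = value // length
--     for i in range(length):
--         if i < value % length:
--             result[i] += 1
--         result[i] += addition
--     if reversed: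
--         result.reverse()
--     return result
-- ===== SOURCE B (Python) =====
-- def __get_portions(length: int, value: int, reversed: bool = False) -> list:
--     # Greedy peeling: repeatedly take one portion off the remaining value.
--     # Without `reversed` each step takes the ceiling share ceil(v/n) (larger
--     # portions come first); with `reversed` it takes the floor share (smaller
--     # portions first). The rest is distributed over the remaining slots.
--     res = []
--     n, v = length, value
--     while n > 0:
--         head = v // n if reversed else -((-v) // n)
--         res.append(head)
--         v -= head
--         n -= 1
--     return res
-- ===== Notes on version B (the rewrite author's own statement) =====
-- stated objective: alternative
-- what changed: Replaces the index loop with conditional per-slot increments by a greedy recursion that peels one portion at a time (ceiling share when larger portions come first, floor share when reversed), distributing the remainder into the recursive tail.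
import Mathlib
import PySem

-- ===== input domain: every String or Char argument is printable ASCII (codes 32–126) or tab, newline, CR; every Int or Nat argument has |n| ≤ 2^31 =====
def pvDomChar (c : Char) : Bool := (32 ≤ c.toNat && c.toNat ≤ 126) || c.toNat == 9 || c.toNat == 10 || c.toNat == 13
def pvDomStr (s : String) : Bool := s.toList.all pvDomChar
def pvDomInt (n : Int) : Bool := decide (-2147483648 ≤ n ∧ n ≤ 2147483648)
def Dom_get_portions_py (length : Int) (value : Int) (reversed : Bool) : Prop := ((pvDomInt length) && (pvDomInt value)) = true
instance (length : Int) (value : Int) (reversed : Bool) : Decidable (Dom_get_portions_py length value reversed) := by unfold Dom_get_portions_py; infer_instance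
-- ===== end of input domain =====

-- B replaces the branch-and-mutate index loop by a greedy recursion that peels one
-- portion at a time (ceiling share normally, floor share when reversed) — alternative decomposition.

-- ===== PORT A =====
def get_portions_py (length : Int) (value : Int) (reversed : Bool) : List Int :=
  if length = 0 then []
  else
    let result : List Int := (PySem.List.pyRange 0 length 1).map (fun _ => 0)
    let addition := PySem.Int.floordiv value length
    let result := (PySem.List.pyRange 0 length 1).foldl (fun res i =>
      let res := if i < PySem.Int.mod value length
                 then PySem.List.pySetD res i (PySem.List.pyGetD res i 0 + 1)
                 else res
      PySem.List.pySetD res i (PySem.List.pyGetD res i 0 + addition)) result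
    if reversed then result.reverse else result

-- ===== PORT B =====
def gp_alt_loop (n : Int) (v : Int) (rv : Bool) (acc : List Int) : List Int :=
  if 0 < n then
    let head := if rv then PySem.Int.floordiv v n
                else -(PySem.Int.floordiv (-v) n)
    gp_alt_loop (n - 1) (v - head) rv (acc ++ [head])
  else acc
termination_by n.toNat
decreasing_by
  rename_i h
  omega

def get_portions_py_alt (length : Int) (value : Int) (reversed : Bool) : List Int :=
  gp_alt_loop length value reversed []

-- ===== PRECONDITION & SPEC =====
def Spec_get_portions_py (length : Int) (value : Int) (reversed : Bool) (out : List Int) : Prop := out = get_portions_py_alt length value reversed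
instance (length : Int) (value : Int) (reversed : Bool) (out : List Int) : Decidable (Spec_get_portions_py length value reversed out) := by unfold Spec_get_portions_py; infer_instance

-- ===== CLAIM (what is proved, stated in full; the proofs are below) =====
def Claim_equal_get_portions_py : Prop := ∀ (length : Int) (value : Int) (reversed : Bool), Dom_get_portions_py length value reversed → Spec_get_portions_py length value reversed (get_portions_py length value reversed)

-- ===== LEMMAS AND PROOFS =====

-- Characterisation of Python floor divmod by its defining inequalities.
lemma pv_divmod_char (a b q r : Int) (hb : 0 < b) (h : a = q * b + r)
    (h0 : 0 ≤ r) (h1 : r < b) :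
    PySem.Int.floordiv a b = q ∧ PySem.Int.mod a b = r := by
  have hq : PySem.Int.floordiv a b = q := by
    rw [PySem.Int.floordiv_eq_iff_of_pos hb]
    have e : (q + 1) * b = q * b + b := by ring
    rw [e]
    constructor <;> linarith
  refine ⟨hq, ?_⟩
  have hm := PySem.Int.floordiv_mul_add_mod a b
  rw [hq] at hm
  linarith

-- Ceiling division -((-a) // b) in terms of floor quotient and remainder.
lemma pv_ceil_char (a b q r : Int) (hb : 0 < b) (h : a = q * b + r)
    (h0 : 0 ≤ r) (h1 : r < b) :
    -(PySem.Int.floordiv (-a) b) = if r = 0 then q else q + 1 := by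
  rw [PySem.Int.neg_floordiv_neg_eq_iff_of_pos hb]
  split_ifs with hr
  · have e : (q - 1) * b = q * b - b := by ring
    rw [e]
    constructor <;> linarith
  · have h2 : 1 ≤ r := by omega
    have e1 : (q + 1 - 1) * b = q * b := by ring
    have e2 : (q + 1) * b = q * b + b := by ring
    rw [e1, e2]
    constructor <;> linarith

-- B's loop produces acc followed by the two homogeneous blocks (in the order fixed by `rv`).
lemma alt_blocks (rv : Bool) (n v : Int) (acc : List Int) (hn : 0 < n) :
    gp_alt_loop n v rv acc =
      acc ++
      (if rv then
        List.replicate (n - PySem.Int.mod v n).toNat (PySem.Int.floordiv v n)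
          ++ List.replicate (PySem.Int.mod v n).toNat (PySem.Int.floordiv v n + 1)
      else
        List.replicate (PySem.Int.mod v n).toNat (PySem.Int.floordiv v n + 1)
          ++ List.replicate (n - PySem.Int.mod v n).toNat (PySem.Int.floordiv v n)) := by
  set q := PySem.Int.floordiv v n with hqdef
  set r := PySem.Int.mod v n with hrdef
  have hv : v = q * n + r := by
    have h := PySem.Int.floordiv_mul_add_mod v n
    rw [← hqdef, ← hrdef] at h
    linarith
  have hr0 : 0 ≤ r := PySem.Int.mod_nonneg v hn
  have hrn : r < n := PySem.Int.mod_lt v hn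
  by_cases h1 : n = 1
  · subst h1
    have hr : r = 0 := by omega
    have hq : q = v := by omega
    have hc : -(PySem.Int.floordiv (-v) 1) = v := by
      have h := pv_ceil_char v 1 v 0 (by omega) (by ring) le_rfl one_pos
      simpa using h
    have hf : PySem.Int.floordiv v 1 = v := by
      exact (pv_divmod_char v 1 v 0 one_pos (by ring) le_rfl one_pos).1
    cases rv <;>
      · rw [gp_alt_loop, if_pos (by omega : (0:Int) < 1)]
        simp only [reduceIte, hc, hf]
        rw [gp_alt_loop]
        simp [hr, ← hq]
  · have hn1 : 0 < n - 1 := by omega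
    cases rv
    · -- normal order: each head is the ceiling share
      have hhead : -(PySem.Int.floordiv (-v) n) = if r = 0 then q else q + 1 :=
        pv_ceil_char v n q r hn hv hr0 hrn
      rw [gp_alt_loop, if_pos hn]
      simp only [Bool.false_eq_true, if_false, hhead]
      by_cases hr : r = 0
      · rw [if_pos hr]
        have hdm := pv_divmod_char (v - q) (n - 1) q 0 hn1 (by rw [hv, hr]; ring)
          le_rfl hn1
        rw [alt_blocks false (n - 1) (v - q) (acc ++ [q]) hn1, hdm.1, hdm.2]
        simp [hr]
        have h4 : n.toNat = (n.toNat - 1) + 1 := by omega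
        rw [h4, List.replicate_succ]
        simp
      · rw [if_neg hr]
        have hdm := pv_divmod_char (v - (q + 1)) (n - 1) q (r - 1) hn1
          (by rw [hv]; ring) (by omega) (by omega)
        rw [alt_blocks false (n - 1) (v - (q + 1)) (acc ++ [q + 1]) hn1, hdm.1, hdm.2]
        have h2 : r.toNat = (r - 1).toNat + 1 := by omega
        have h3 : (n - r).toNat = (n - 1 - (r - 1)).toNat := by omega
        simp only [Bool.false_eq_true, if_false, h2, h3, List.replicate_succ,
          List.cons_append, List.append_assoc]
        simp
    · -- reversed order: each head is the floor share
      rw [gp_alt_loop, if_pos hn]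
      simp only [reduceIte]
      rw [← hqdef]
      by_cases hr : r = n - 1
      · have hdm := pv_divmod_char (v - q) (n - 1) (q + 1) 0 hn1
          (by rw [hv, hr]; ring) le_rfl hn1
        rw [alt_blocks true (n - 1) (v - q) (acc ++ [q]) hn1, hdm.1, hdm.2]
        have h2 : (n - r).toNat = 1 := by omega
        simp [h2]
        omega
      · have hdm := pv_divmod_char (v - q) (n - 1) q r hn1
          (by rw [hv]; ring) hr0 (by omega)
        rw [alt_blocks true (n - 1) (v - q) (acc ++ [q]) hn1, hdm.1, hdm.2]
        have h2 : (n - r).toNat = (n - 1 - r).toNat + 1 := by omega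
        simp only [h2, List.replicate_succ, List.cons_append, List.append_assoc]
        simp
termination_by n.toNat
decreasing_by all_goals omega

-- The loop invariant for A: starting from a written prefix `done` followed by zeros,
-- folding the loop body over the remaining indices writes its value at each index.
lemma gp_loop_inv (r q n : Int) (done : List Int) (a : Int)
    (hd : (done.length : Int) = a) (ha : a ≤ n) :
    (PySem.List.pyRange a n 1).foldl (fun res i =>
      let res := if i < r
                 then PySem.List.pySetD res i (PySem.List.pyGetD res i 0 + 1)
                 else res
      PySem.List.pySetD res i (PySem.List.pyGetD res i 0 + q))
      (done ++ List.replicate (n - a).toNat 0)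
    = done ++ (PySem.List.pyRange a n 1).map (fun i => (if i < r then 1 else 0) + q) := by
  by_cases h : n ≤ a
  · have hna : (n - a).toNat = 0 := by omega
    rw [PySem.List.pyRange_one_eq_nil h, hna]
    simp
  · rw [not_le] at h
    have ha0 : 0 ≤ a := by omega
    have hdn : a.toNat = done.length := by omega
    have hrep : (n - a).toNat = ((n - (a+1)).toNat) + 1 := by omega
    rw [PySem.List.pyRange_one_cons h, List.foldl_cons, hrep, List.replicate_succ]
    have step1 : (let res := if a < r
                   then PySem.List.pySetD (done ++ (0:Int) :: List.replicate (n - (a+1)).toNat 0) a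
                          (PySem.List.pyGetD (done ++ (0:Int) :: List.replicate (n - (a+1)).toNat 0) a 0 + 1)
                   else done ++ (0:Int) :: List.replicate (n - (a+1)).toNat 0
                  PySem.List.pySetD res a (PySem.List.pyGetD res a 0 + q))
        = (done ++ [(if a < r then 1 else 0) + q]) ++ List.replicate (n - (a+1)).toNat 0 := by
      simp only [PySem.List.pyGetD_of_nonneg _ _ ha0, PySem.List.pySetD_of_nonneg _ _ ha0, hdn]
      split_ifs with har
      · simp [List.getD]
      · simp [List.getD]
    rw [step1]
    have ih := gp_loop_inv r q n (done ++ [(if a < r then 1 else 0) + q]) (a + 1)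
      (by simp; omega) (by omega)
    rw [ih]
    simp
termination_by (n - a).toNat
decreasing_by omega

-- the mapped loop values over [0, n) are exactly the two replicated blocks
lemma gp_map_blocks (n value : Int) (hn : 0 < n) :
    (PySem.List.pyRange 0 n 1).map (fun i => (if i < PySem.Int.mod value n then 1 else 0) + PySem.Int.floordiv value n)
    = List.replicate (PySem.Int.mod value n).toNat (PySem.Int.floordiv value n + 1)
      ++ List.replicate (n - PySem.Int.mod value n).toNat (PySem.Int.floordiv value n) := by
  set r := PySem.Int.mod value n with hr
  set q := PySem.Int.floordiv value n with hq
  have hr0 : 0 ≤ r := PySem.Int.mod_nonneg value hn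
  have hrn : r < n := PySem.Int.mod_lt value hn
  rw [PySem.List.pyRange_one_append 0 r n hr0 (le_of_lt hrn), List.map_append]
  congr 1
  · have h1 : (PySem.List.pyRange 0 r 1).map (fun i => (if i < r then 1 else 0) + q)
        = (PySem.List.pyRange 0 r 1).map (fun _ => q + 1) := by
      apply List.map_congr_left
      intro i hi
      rw [PySem.List.mem_pyRange_one] at hi
      simp [hi.2]
      ring
    rw [h1, List.map_const', PySem.List.length_pyRange_one]
    simp
  · have h2 : (PySem.List.pyRange r n 1).map (fun i => (if i < r then 1 else 0) + q)
        = (PySem.List.pyRange r n 1).map (fun _ => q) := by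
      apply List.map_congr_left
      intro i hi
      rw [PySem.List.mem_pyRange_one] at hi
      simp [not_lt.mpr hi.1]
    rw [h2, List.map_const', PySem.List.length_pyRange_one]

-- ===== VERDICT (by name: the statement is the Claim_ definition above) =====
theorem get_portions_py_spec : Claim_equal_get_portions_py := by
  intro length value reversed _
  unfold Spec_get_portions_py get_portions_py
  by_cases h0 : length = 0
  · simp [h0, get_portions_py_alt, gp_alt_loop]
  · by_cases hpos : length ≤ 0
    · rw [if_neg h0]
      rw [PySem.List.pyRange_one_eq_nil hpos]
      have hneg : ¬ (0:Int) < length := by omega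
      simp [get_portions_py_alt, gp_alt_loop, hneg]
    · rw [not_le] at hpos
      rw [if_neg h0]
      unfold get_portions_py_alt
      rw [alt_blocks reversed length value [] hpos, List.nil_append]
      simp only []
      have hinit : (PySem.List.pyRange 0 length 1).map (fun _ => (0 : Int))
          = [] ++ List.replicate (length - 0).toNat 0 := by
        rw [List.map_const', PySem.List.length_pyRange_one]
        simp
      rw [hinit]
      rw [gp_loop_inv (PySem.Int.mod value length) (PySem.Int.floordiv value length) length [] 0 (by simp) (by omega)]
      rw [List.nil_append, gp_map_blocks length value hpos]
      cases reversed
      · simp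
      · simp [List.reverse_append, List.reverse_replicate]
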